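-- pv_equiv track=rewrite | github.com/Semih1997/CodingBat-Java-Problems-in-Python | Codingbat Java String-3/QcountTriple.py | countTriple
-- ===== SOURCE A (Python) =====
-- def countTriple(a):
--     i = 0
--     count_triple = 0
--     while i < len(a)-2:
--         if a[i] == a[i+1] == a[i+2]:
--             count_triple += 1
--             i += 1
--         else:
--             i += 1
--     return count_triple
-- ===== SOURCE B (Python) =====
-- def countTriple(a):
--     # Run-length pass: each maximal run of length L contributes max(0, L-2) triples.
--     if not a:
--         return 0
--     total = 0
--     run_char = a[0]
--     run_len = 1
--     for ch in a[1:]: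
--         if ch == run_char:
--             run_len += 1
--         else:
--             total += max(0, run_len - 2)
--             run_char, run_len = ch, 1
--     return total + max(0, run_len - 2)
-- ===== Notes on version B (the rewrite author's own statement) =====
-- stated objective: alternative
-- what changed: Replaces the per-index sliding-window scan with a single run-length pass: each maximal run of equal characters of length L contributes max(0, L-2), summed over runs.
import Mathlib
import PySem

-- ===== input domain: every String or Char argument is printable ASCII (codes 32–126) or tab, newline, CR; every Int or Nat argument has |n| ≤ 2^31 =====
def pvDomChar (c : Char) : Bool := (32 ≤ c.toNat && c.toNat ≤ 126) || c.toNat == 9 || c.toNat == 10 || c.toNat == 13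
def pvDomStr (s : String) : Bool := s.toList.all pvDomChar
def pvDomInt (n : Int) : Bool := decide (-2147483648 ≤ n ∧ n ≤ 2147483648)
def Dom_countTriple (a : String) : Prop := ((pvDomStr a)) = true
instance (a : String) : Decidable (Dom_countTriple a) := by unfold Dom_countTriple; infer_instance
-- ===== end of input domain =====

-- B replaces A's per-index sliding-window scan with a single run-length pass
-- (each maximal run of length L contributes max(0, L-2)); a different decomposition at the same cost.

-- ===== PORT A =====
-- A's while loop advances i by 1 each step and tests the window a[i], a[i+1], a[i+2];
-- transliterated as structural recursion on the character list: the window at i is the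
-- three leading elements of the current suffix, and each step drops one element (i += 1).
def countTripleAux : List Char → Int
  | x :: y :: z :: rest =>
      (if x = y ∧ y = z then 1 else 0) + countTripleAux (y :: z :: rest)
  | _ => 0

def countTriple (a : String) : Int := countTripleAux a.toList

-- ===== PORT B =====
-- Source B's for-loop body over state (total, run_char, run_len)
def countTripleStepB (st : Int × Char × Nat) (ch : Char) : Int × Char × Nat :=
  if ch = st.2.1 then (st.1, st.2.1, st.2.2 + 1)
  else (st.1 + max 0 ((st.2.2 : Int) - 2), ch, 1)

def countTriple_alt (a : String) : Int :=
  match a.toList with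
  | [] => 0
  | x :: rest =>
      let st := rest.foldl countTripleStepB (0, x, 1)
      st.1 + max 0 ((st.2.2 : Int) - 2)

-- ===== PRECONDITION & SPEC =====
def Spec_countTriple (a : String) (out : Int) : Prop := out = countTriple_alt a
instance (a : String) (out : Int) : Decidable (Spec_countTriple a out) := by unfold Spec_countTriple; infer_instance

-- ===== CLAIM (what is proved, stated in full; the proofs are below) =====
def Claim_equal_countTriple : Prop := ∀ (a : String), Dom_countTriple a → Spec_countTriple a (countTriple a)

-- ===== LEMMAS AND PROOFS =====

-- A pure run of length n contains max(0, n-2) triples.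
theorem auxA_replicate (n : Nat) (c : Char) :
    countTripleAux (List.replicate n c) = max 0 ((n : Int) - 2) := by
  match n with
  | 0 => simp [countTripleAux]
  | 1 => simp [countTripleAux]
  | 2 => simp [countTripleAux]
  | Nat.succ (Nat.succ (Nat.succ m)) =>
      have ih := auxA_replicate (m + 2) c
      simp only [List.replicate_succ, countTripleAux, and_self, if_pos] at ih ⊢
      rw [ih]
      push_cast
      omega

-- A run of length n followed by a different character contributes max(0, n-2);
-- no window crossing the boundary counts.
theorem auxA_run (n : Nat) (c x : Char) (rest : List Char) (hx : x ≠ c) :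
    countTripleAux (List.replicate n c ++ x :: rest) =
      max 0 ((n : Int) - 2) + countTripleAux (x :: rest) := by
  match n with
  | 0 => simp
  | 1 =>
      cases rest with
      | nil => simp [countTripleAux]
      | cons z r =>
          simp only [List.replicate_succ, List.replicate_zero, List.nil_append,
            List.cons_append, countTripleAux]
          have : ¬ (c = x ∧ x = z) := fun h => hx h.1.symm
          simp [this]
  | 2 =>
      have h1 := auxA_run 1 c x rest hx
      simp only [List.replicate_succ, List.replicate_zero, List.nil_append,
        List.cons_append] at h1 ⊢
      rw [show countTripleAux (c :: c :: x :: rest) =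
            (if c = c ∧ c = x then 1 else 0) + countTripleAux (c :: x :: rest) from by
          cases rest <;> rfl]
      rw [h1]
      have hcc : ¬ (c = c ∧ c = x) := fun h => hx h.2.symm
      rw [if_neg hcc]
      norm_num
  | Nat.succ (Nat.succ (Nat.succ m)) =>
      have ih := auxA_run (m + 2) c x rest hx
      simp only [List.replicate_succ, List.cons_append, countTripleAux, and_self, if_pos] at ih ⊢
      rw [ih]
      push_cast
      omega

-- Fold invariant: folding B's step starting inside a run of c of length n, plus the
-- final flush, equals A's window count on replicate n c ++ rest.
theorem foldB_invariant (rest : List Char) (t : Int) (c : Char) (n : Nat) :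
    (let st := rest.foldl countTripleStepB (t, c, n)
     st.1 + max 0 ((st.2.2 : Int) - 2)) =
      t + countTripleAux (List.replicate n c ++ rest) := by
  induction rest generalizing t c n with
  | nil => simp [auxA_replicate]
  | cons ch rest ih =>
      by_cases h : ch = c
      · subst h
        simp only [List.foldl_cons, countTripleStepB, if_true]
        have e : List.replicate n ch ++ ch :: rest = List.replicate (n + 1) ch ++ rest := by
          rw [List.replicate_succ' (n := n) (a := ch)]; simp
        rw [e]
        exact ih t ch (n + 1)
      · simp only [List.foldl_cons, countTripleStepB]
        rw [if_neg h]
        rw [ih, auxA_run n c ch rest h]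
        have e : List.replicate 1 ch ++ rest = ch :: rest := by simp
        rw [e]
        ring

-- ===== VERDICT (by name: the statement is the Claim_ definition above) =====
theorem countTriple_spec : Claim_equal_countTriple := by
  intro a _
  unfold Spec_countTriple countTriple countTriple_alt
  cases h : a.toList with
  | nil => simp [countTripleAux]
  | cons x rest =>
      have := foldB_invariant rest 0 x 1
      simp only [List.replicate_one, List.cons_append, List.nil_append] at this
      simpa using this.symm
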